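-- pv_equiv track=rewrite | github.com/jethack23/leetcode-daily | 2023/01/python_versions/d03_p944_delete_columns_to_make_sorted.py | is_has_invert
-- ===== SOURCE A (Python) =====
-- def is_has_invert(col):
--     for i in range(len(col) - 1):
--         if is_inverted(col, i):
--             return True
--             _hy_anon_var_2 = None
--         else:
--             _hy_anon_var_2 = None
--     return False
--
-- def is_inverted(col, i):
--     return col[i] > col[i + 1]
-- ===== SOURCE B (Python) =====
-- def is_has_invert(col):
--     return list(col) != sorted(col)
-- ===== Notes on version B (the rewrite author's own statement) =====
-- stated objective: idiomatic
-- what changed: Replaced the index loop with its adjacent-pair helper by a one-line comparison of the column against its sorted copy.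
import Mathlib
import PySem

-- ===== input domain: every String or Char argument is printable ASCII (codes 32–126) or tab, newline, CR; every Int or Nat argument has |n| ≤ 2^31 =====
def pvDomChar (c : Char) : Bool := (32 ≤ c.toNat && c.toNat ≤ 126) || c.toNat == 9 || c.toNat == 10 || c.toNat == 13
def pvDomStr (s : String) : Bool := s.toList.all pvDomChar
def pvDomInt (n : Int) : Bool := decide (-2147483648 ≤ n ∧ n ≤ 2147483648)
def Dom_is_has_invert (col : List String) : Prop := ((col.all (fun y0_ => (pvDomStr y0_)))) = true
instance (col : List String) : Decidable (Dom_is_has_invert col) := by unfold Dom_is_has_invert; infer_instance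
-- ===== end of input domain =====

-- B replaces the index loop and its adjacent-pair helper with the idiomatic one-liner col != sorted(col).


-- ===== PORT A =====
-- helper is_inverted; in is_has_invert it is only called with 0 ≤ i < len-1, so pyGet? is
-- always 'some' there (the 'false' fallback branch is unreachable from is_has_invert).
def is_inverted (col : List String) (i : Int) : Bool :=
  match PySem.List.pyGet? col i, PySem.List.pyGet? col (i + 1) with
  | some a, some b => decide (a > b)
  | _, _ => false

def is_has_invert (col : List String) : Bool :=
  (PySem.List.pyRange 0 ((col.length : Int) - 1) 1).any (fun i => is_inverted col i)

-- ===== PORT B =====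
def is_has_invert_alt (col : List String) : Bool :=
  decide (col ≠ PySem.List.sorted col (fun x => x) false)

-- ===== PRECONDITION & SPEC =====
def Spec_is_has_invert (col : List String) (out : Bool) : Prop := out = is_has_invert_alt col
instance (col : List String) (out : Bool) : Decidable (Spec_is_has_invert col out) := by unfold Spec_is_has_invert; infer_instance

-- ===== CLAIM (what is proved, stated in full; the proofs are below) =====
def Claim_equal_is_has_invert : Prop := ∀ (col : List String), Dom_is_has_invert col → Spec_is_has_invert col (is_has_invert col)

-- ===== LEMMAS AND PROOFS =====

-- A's loop finds a descending adjacent pair iff the list is not Pairwise (· ≤ ·).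
theorem is_has_invert_eq_true_iff (col : List String) :
    is_has_invert col = true ↔ ¬ col.Pairwise (· ≤ ·) := by
  rw [show ¬ col.Pairwise (fun a b => a ≤ b) ↔ ¬ List.IsChain (fun a b => a ≤ b) col from
    not_congr (List.isChain_iff_pairwise (R := fun a b : String => a ≤ b)).symm]
  rw [List.isChain_iff_getElem]
  unfold is_has_invert
  simp only [List.any_eq_true, PySem.List.mem_pyRange_one]
  constructor
  · rintro ⟨i, ⟨h0, h1⟩, hinv⟩ hall
    have hi : i.toNat + 1 < col.length := by omega
    unfold is_inverted at hinv
    rw [PySem.List.pyGet?_eq_some_getElem col (i := i) h0 (by omega),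
        PySem.List.pyGet?_eq_some_getElem col (i := i+1) (by omega) (by omega)] at hinv
    simp only [decide_eq_true_eq] at hinv
    have hcast : col[(i+1).toNat] = col[i.toNat + 1] := by
      congr 1; omega
    rw [hcast] at hinv
    exact absurd (hall i.toNat (by omega)) (not_le.mpr hinv)
  · intro h
    by_contra hno
    push Not at hno
    apply h
    intro k hk
    have hnk := hno (k : Int) ⟨by omega, by omega⟩
    unfold is_inverted at hnk
    rw [PySem.List.pyGet?_eq_some_getElem col (i := (k : Int)) (by omega) (by omega),
        PySem.List.pyGet?_eq_some_getElem col (i := (k : Int)+1) (by omega) (by omega)] at hnk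
    simp only [ne_eq, decide_eq_true_eq, not_lt] at hnk
    simpa using hnk

theorem pairwise_iff_sorted_eq (col : List String) :
    col.Pairwise (· ≤ ·) ↔ PySem.List.sorted col (fun x => x) false = col := by
  constructor
  · intro h; exact PySem.List.sorted_eq_self_of_pairwise col (fun x => x) h
  · intro h
    have := PySem.List.sorted_pairwise col (fun x : String => x)
    rw [h] at this
    exact this

-- ===== VERDICT (by name: the statement is the Claim_ definition above) =====
theorem is_has_invert_spec : Claim_equal_is_has_invert := by
  intro col _
  unfold Spec_is_has_invert is_has_invert_alt
  rcases h : is_has_invert col with _ | _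
  · have hp : col.Pairwise (· ≤ ·) := by
      by_contra hnp
      rw [← is_has_invert_eq_true_iff] at hnp
      simp [hnp] at h
    have := (pairwise_iff_sorted_eq col).mp hp
    simp [this]
  · have hp := (is_has_invert_eq_true_iff col).mp h
    have : PySem.List.sorted col (fun x => x) false ≠ col := by
      intro heq
      exact hp ((pairwise_iff_sorted_eq col).mpr heq)
    simp [Ne.symm this]
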